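-- pv_equiv track=rewrite | github.com/lockcept/SPA | src/data_generation/full.py | extract_trajectory_indices
-- ===== SOURCE A (Python) =====
-- def extract_trajectory_indices(terminals, timeouts):
--     indices = []
--     start = 0
--     for i in range(len(terminals)):
--         if terminals[i] or timeouts[i]:
--             end = i
--             indices.append((start, end))
--             start = i + 1
--     return indices
-- ===== SOURCE B (Python) =====
-- def extract_trajectory_indices(terminals, timeouts):
--     # Two-pass decomposition: collect boundary positions first, then
--     # pair each boundary with the start derived from the previous boundary.
--     bounds = [i for i in range(len(terminals)) if terminals[i] or timeouts[i]]
--     starts = [0] + [b + 1 for b in bounds[:-1]]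
--     return list(zip(starts, bounds))
-- ===== Notes on version B (the rewrite author's own statement) =====
-- stated objective: alternative
-- what changed: Replaces the single fused loop that carries a mutable running start with a two-pass decomposition: a filter collecting boundary positions, then segment starts derived from shifted boundaries and zipped into pairs.
import Mathlib
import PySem

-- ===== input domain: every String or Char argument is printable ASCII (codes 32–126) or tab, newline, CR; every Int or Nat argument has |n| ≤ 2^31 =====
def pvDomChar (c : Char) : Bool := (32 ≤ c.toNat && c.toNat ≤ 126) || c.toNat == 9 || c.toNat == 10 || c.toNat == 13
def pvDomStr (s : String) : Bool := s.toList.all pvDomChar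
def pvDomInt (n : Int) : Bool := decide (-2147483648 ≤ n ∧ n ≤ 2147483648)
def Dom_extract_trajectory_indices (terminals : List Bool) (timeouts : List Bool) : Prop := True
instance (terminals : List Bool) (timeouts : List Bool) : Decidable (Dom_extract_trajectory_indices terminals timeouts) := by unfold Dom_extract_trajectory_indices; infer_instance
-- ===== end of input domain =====

-- B replaces A's fused loop (mutable running start) with a two-pass decomposition:
-- filter the boundary positions, then zip them with starts derived from shifted boundaries.

-- ===== PORT A =====
-- fused loop: state (indices, start); `terminals[i] or timeouts[i]` short-circuits, so
-- inside Pre_ the getD-default is never the value Python would have raised on.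
def extract_trajectory_indices (terminals : List Bool) (timeouts : List Bool) : List (Int × Int) :=
  ((List.range terminals.length).foldl
    (fun (s : List (Int × Int) × Int) i =>
      if terminals.getD i false || timeouts.getD i false then
        (s.1 ++ [(s.2, (i : Int))], (i : Int) + 1)
      else s)
    ([], 0)).1

-- ===== PORT B =====
def extract_trajectory_indices_alt (terminals : List Bool) (timeouts : List Bool) : List (Int × Int) :=
  let bounds : List Int :=
    ((List.range terminals.length).filter
      (fun i => terminals.getD i false || timeouts.getD i false)).map (Int.ofNat)
  let starts : List Int := 0 :: (bounds.dropLast.map (· + 1))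
  starts.zip bounds

-- ===== PRECONDITION & SPEC =====
-- Pre_ excludes exactly the ragged inputs on which Python A raises IndexError:
-- those with some i < len(terminals) where terminals[i] is False and i ≥ len(timeouts).
def Pre_extract_trajectory_indices (terminals : List Bool) (timeouts : List Bool) : Prop :=
  ∀ i < terminals.length, terminals.getD i false = true ∨ i < timeouts.length
instance (terminals : List Bool) (timeouts : List Bool) : Decidable (Pre_extract_trajectory_indices terminals timeouts) := by unfold Pre_extract_trajectory_indices; infer_instance

def pvWitness_extract_trajectory_indices : List Bool × List Bool := ([false, true, false], [true, false, false])

def Spec_extract_trajectory_indices (terminals : List Bool) (timeouts : List Bool) (out : List (Int × Int)) : Prop := out = extract_trajectory_indices_alt terminals timeouts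
instance (terminals : List Bool) (timeouts : List Bool) (out : List (Int × Int)) : Decidable (Spec_extract_trajectory_indices terminals timeouts out) := by unfold Spec_extract_trajectory_indices; infer_instance

-- ===== CLAIM (what is proved, stated in full; the proofs are below) =====
def Claim_equal_extract_trajectory_indices : Prop := ∀ (terminals : List Bool) (timeouts : List Bool), Dom_extract_trajectory_indices terminals timeouts → Pre_extract_trajectory_indices terminals timeouts → Spec_extract_trajectory_indices terminals timeouts (extract_trajectory_indices terminals timeouts)

-- ===== LEMMAS AND PROOFS =====

-- segment pairs produced from a start and a list of boundary positions
def pvPairs (start : Int) : List Nat → List (Int × Int)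
  | [] => []
  | b :: rest => (start, (b : Int)) :: pvPairs ((b : Int) + 1) rest

theorem pvFoldl_pairs (p : Nat → Bool) (l : List Nat) (acc : List (Int × Int)) (start : Int) :
    (l.foldl (fun (s : List (Int × Int) × Int) i =>
        if p i then (s.1 ++ [(s.2, (i : Int))], (i : Int) + 1) else s) (acc, start)).1
      = acc ++ pvPairs start (l.filter p) := by
  induction l generalizing acc start with
  | nil => simp [pvPairs]
  | cons i l ih =>
    by_cases h : p i
    · simp [List.foldl_cons, h, ih, pvPairs]
    · simp [List.foldl_cons, h, ih]

theorem pvPairs_zip (start : Int) (bs : List Nat) :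
    pvPairs start bs
      = ((start : Int) :: ((bs.map (Int.ofNat)).dropLast.map (· + 1))).zip (bs.map (Int.ofNat)) := by
  induction bs generalizing start with
  | nil => simp [pvPairs]
  | cons b rest ih =>
    cases rest with
    | nil => simp [pvPairs]
    | cons r rs =>
      have hd : (Int.ofNat b :: Int.ofNat r :: List.map Int.ofNat rs).dropLast
          = Int.ofNat b :: (Int.ofNat r :: List.map Int.ofNat rs).dropLast := rfl
      have h2 := ih ((b : Int) + 1)
      simp only [pvPairs, List.map_cons, List.zip_cons_cons] at h2
      simp only [pvPairs, hd, List.map_cons, List.zip_cons_cons]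
      exact congrArg _ h2

-- ===== VERDICT (by name: the statement is the Claim_ definition above) =====
theorem extract_trajectory_indices_spec : Claim_equal_extract_trajectory_indices := by
  intro terminals timeouts _ _
  unfold Spec_extract_trajectory_indices extract_trajectory_indices extract_trajectory_indices_alt
  rw [pvFoldl_pairs, pvPairs_zip]
  simp
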